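-- pv_equiv track=rewrite | github.com/HAL22/bleep-words | bleep.py | blockingSentance
-- ===== SOURCE A (Python) =====
-- def blockingSentance(dictWords,sentance):
--     for s in sentance:
--         arr = s.split(" ")
--         end = 0
--         i = 0
--         j = 0
--         while end < len(arr) and j<len(dictWords):
--             if dictWords[j]['word'].lower() ==  arr[i].lower():
--                 dictWords[j]['word'] = '*'
--                 end = end + 1
--                 i = i + 1
--             j = j + 1
--
--     return dictWords
-- ===== SOURCE B (Python) =====
-- # B: rebuilds the dict list functionally per sentence, consuming the word list
-- # from the front, instead of A's in-place while-loop with three index counters.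
-- # Equivalence is about the RETURN value: A mutates dictWords in place, B does not.
-- def blockingSentance(dictWords, sentance):
--     for s in sentance:
--         ws = s.split(" ")
--         out = []
--         for d in dictWords:
--             if ws and d['word'].lower() == ws[0].lower():
--                 d = dict(d)
--                 d['word'] = '*'
--                 ws = ws[1:]
--             out.append(d)
--         dictWords = out
--     return dictWords
-- ===== Notes on version B (the rewrite author's own statement) =====
-- stated objective: simpler
-- what changed: B replaces A's in-place while-loop over three index counters (i, j, end) with a per-sentence functional rebuild: one pass over the dict list that consumes the remaining word list from the front and emits a new list; return-value equivalence only (A mutates dictWords in place, B builds new lists). Pre_ excludes inputs whose dict list contains a dict without key 'word' while sentance is nonempty: accessing such a dict raises KeyError in both programs (A can still return when its scan stops before reaching the bad dict).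
import Mathlib
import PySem

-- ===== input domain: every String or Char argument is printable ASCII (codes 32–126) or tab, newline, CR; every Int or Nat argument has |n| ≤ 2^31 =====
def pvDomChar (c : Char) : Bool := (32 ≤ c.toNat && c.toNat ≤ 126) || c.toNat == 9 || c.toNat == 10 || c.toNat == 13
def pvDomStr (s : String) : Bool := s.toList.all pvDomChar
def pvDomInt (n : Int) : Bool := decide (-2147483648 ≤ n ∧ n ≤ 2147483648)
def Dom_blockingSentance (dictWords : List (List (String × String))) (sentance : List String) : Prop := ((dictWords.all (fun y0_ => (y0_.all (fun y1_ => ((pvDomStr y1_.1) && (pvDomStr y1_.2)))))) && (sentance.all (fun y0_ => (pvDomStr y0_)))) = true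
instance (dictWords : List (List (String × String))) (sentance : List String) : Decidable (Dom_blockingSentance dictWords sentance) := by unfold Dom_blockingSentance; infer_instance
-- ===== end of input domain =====

-- B rebuilds the dict list functionally per sentence (one pass consuming the word list
-- from the front) instead of A's in-place while-loop over three index counters; equivalence
-- is about the RETURN value only (Python A mutates dictWords in place, B builds new lists).

-- s.split(" ")
def pvSplit (s : String) : List String := (PySem.Str.split? s " ").getD []

-- shared dict primitives: d['word'] (first match) and d['word'] = '*' (overwrite in place)
def pvGetWord (d : List (String × String)) : String := ((PySem.Dict.mk d).get? "word").getD ""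
def pvStar (d : List (String × String)) : List (String × String) := ((PySem.Dict.mk d).insert "word" "*").items

-- ===== PORT A =====
-- A's while loop: counters end, i, j; j advances every iteration, matches star the entry in place
def pvLoopA (dw : List (List (String × String))) (arr : List String) (endv i j : Nat) :
    List (List (String × String)) :=
  if h : endv < arr.length ∧ j < dw.length then
    if PySem.Str.lower (pvGetWord (dw[j]'h.2)) == PySem.Str.lower ((arr[i]?).getD "") then
      pvLoopA (dw.set j (pvStar (dw[j]'h.2))) arr (endv + 1) (i + 1) (j + 1)
    else
      pvLoopA dw arr endv i (j + 1)
  else dw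
termination_by dw.length - j
decreasing_by
  · simp only [List.length_set]; omega
  · omega

def blockingSentance (dictWords : List (List (String × String))) (sentance : List String) : List (List (String × String)) :=
  sentance.foldl (fun dw s => pvLoopA dw (pvSplit s) 0 0 0) dictWords

-- ===== PORT B =====
-- Source B's inner loop: walk the dict list once, carrying the remaining words ws
def pvCensor (ws : List String) (dicts : List (List (String × String))) :
    List (List (String × String)) :=
  match dicts with
  | [] => []
  | d :: rest =>
    match ws with
    | [] => d :: pvCensor [] rest
    | w :: wrest =>
      if PySem.Str.lower (pvGetWord d) == PySem.Str.lower w then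
        pvStar d :: pvCensor wrest rest
      else
        d :: pvCensor (w :: wrest) rest

def blockingSentance_alt (dictWords : List (List (String × String))) (sentance : List String) : List (List (String × String)) :=
  sentance.foldl (fun dw s => pvCensor (pvSplit s) dw) dictWords

-- ===== PRECONDITION & SPEC =====
-- Pre_ excludes inputs whose dict list contains a dict without key 'word' while sentance is
-- nonempty: accessing such a dict raises KeyError in Python (A can still return when its scan
-- stops before reaching the bad dict; B then returns the same value — see claim cites).
def Pre_blockingSentance (dictWords : List (List (String × String))) (sentance : List String) : Prop :=
  sentance = [] ∨ ∀ d ∈ dictWords, ((PySem.Dict.mk d).get? "word").isSome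
instance (dictWords : List (List (String × String))) (sentance : List String) : Decidable (Pre_blockingSentance dictWords sentance) := by unfold Pre_blockingSentance; infer_instance

def pvWitness_blockingSentance : (List (List (String × String))) × List String :=
  ([[("word", "Hi")], [("word", "there")]], ["hi there"])

def Spec_blockingSentance (dictWords : List (List (String × String))) (sentance : List String) (out : List (List (String × String))) : Prop := out = blockingSentance_alt dictWords sentance
instance (dictWords : List (List (String × String))) (sentance : List String) (out : List (List (String × String))) : Decidable (Spec_blockingSentance dictWords sentance out) := by unfold Spec_blockingSentance; infer_instance

-- ===== CLAIM (what is proved, stated in full; the proofs are below) =====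
def Claim_equal_blockingSentance : Prop := ∀ (dictWords : List (List (String × String))) (sentance : List String), Dom_blockingSentance dictWords sentance → Pre_blockingSentance dictWords sentance → Spec_blockingSentance dictWords sentance (blockingSentance dictWords sentance)

-- ===== LEMMAS AND PROOFS =====

lemma pvCensor_nil : ∀ (dicts : List (List (String × String))), pvCensor [] dicts = dicts := by
  intro dicts
  induction dicts with
  | nil => rfl
  | cons d rest ih => simp [pvCensor, ih]

-- loop invariant: with end = i, A's loop from position (i, j) produces the untouched prefix
-- take j followed by B's one-pass censoring of the remaining words over the remaining dicts
lemma pvLoopA_eq (arr : List String) :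
    ∀ (j : Nat) (dw : List (List (String × String))) (i : Nat), j ≤ dw.length →
      pvLoopA dw arr i i j = dw.take j ++ pvCensor (arr.drop i) (dw.drop j) := by
  intro j dw
  induction hn : dw.length - j using Nat.strong_induction_on generalizing j dw with
  | _ n ih =>
  intro i hj
  rw [pvLoopA]
  by_cases hcond : i < arr.length ∧ j < dw.length
  · simp only [dif_pos hcond]
    obtain ⟨hi, hjl⟩ := hcond
    have hdropd : dw.drop j = dw[j] :: dw.drop (j + 1) := (List.getElem_cons_drop hjl).symm
    have hdropa : arr.drop i = arr[i] :: arr.drop (i + 1) := (List.getElem_cons_drop hi).symm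
    have hgi : (arr[i]?).getD "" = arr[i] := by simp [List.getElem?_eq_getElem hi]
    rw [hgi]
    by_cases hm : (PySem.Str.lower (pvGetWord dw[j]) == PySem.Str.lower arr[i]) = true
    · rw [if_pos hm]
      have h1 := ih (dw.length - (j + 1)) (by omega) (j + 1) (dw.set j (pvStar dw[j]))
        (by simp) (i + 1) (by simp; omega)
      rw [h1, hdropd, hdropa, pvCensor, if_pos hm]
      rw [List.drop_set, if_pos (by omega : j < j + 1)]
      rw [List.take_add_one, List.take_set, List.getElem?_set_self hjl]
      rw [List.set_eq_of_length_le (by simp [hj])]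
      simp
    · rw [if_neg hm]
      have h1 := ih (dw.length - (j + 1)) (by omega) (j + 1) dw rfl i (by omega)
      rw [h1, hdropd, hdropa, pvCensor, if_neg hm, ← hdropa]
      have ht : List.take (j + 1) dw = List.take j dw ++ [dw[j]] := by
        rw [List.take_add_one, List.getElem?_eq_getElem hjl]
        rfl
      rw [ht, List.append_assoc]
      rfl
  · simp only [dif_neg hcond]
    by_cases hjl : j < dw.length
    · have hi : arr.length ≤ i := by
        by_contra h
        exact hcond ⟨by omega, hjl⟩
      rw [List.drop_eq_nil_of_le hi, pvCensor_nil, List.take_append_drop]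
    · have hd : dw.drop j = [] := List.drop_eq_nil_of_le (by omega)
      rw [hd]
      cases harr : arr.drop i <;>
        simp [pvCensor, List.take_of_length_le (by omega : dw.length ≤ j)]

lemma step_eq (dw : List (List (String × String))) (s : String) :
    pvLoopA dw (pvSplit s) 0 0 0 = pvCensor (pvSplit s) dw := by
  simpa using pvLoopA_eq (pvSplit s) 0 dw 0 (Nat.zero_le _)

lemma folds_eq (sentance : List String) (dw : List (List (String × String))) :
    sentance.foldl (fun dw s => pvLoopA dw (pvSplit s) 0 0 0) dw =
    sentance.foldl (fun dw s => pvCensor (pvSplit s) dw) dw := by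
  simp only [step_eq]

-- ===== VERDICT (by name: the statement is the Claim_ definition above) =====
theorem blockingSentance_spec : Claim_equal_blockingSentance := by
  intro dictWords sentance _ _
  unfold Spec_blockingSentance blockingSentance blockingSentance_alt
  exact folds_eq sentance dictWords
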